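-- pv_equiv track=rewrite | github.com/josecatela/sgcodewars | day27/day27.py | diana_henninger_day27
-- ===== SOURCE A (Python) =====
-- def diana_henninger_day27(chars):
--     l = len(chars)
--     if l==0 : return ''
--     elif l==1: return chars
--     else:
--         solution = ""
--         index = 0
--         count = 1
--         found = 0
--         res = ""
--         while found < 5:
--             solution += chars[(index*count)%len(chars)]
--             index += 2
--             count += 1
--             temp = (solution + solution).find(solution, 1, -1)
--             if temp != -1:
--                 res = solution[:temp]
--                 found+=1
--         return res
-- ===== SOURCE B (Python) =====
-- def diana_henninger_day27(chars):
--     l = len(chars)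
--     if l == 0:
--         return ''
--     if l == 1:
--         return chars
--     # the appended index 2*k*(k+1) % l is periodic in k with period l: precompute one block
--     block = ''.join(chars[(2 * k * (k + 1)) % l] for k in range(l))
--     s = ''
--     res = ''
--     found = 0
--     k = 0
--     while found < 5:
--         s += block[k % l]
--         k += 1
--         n = len(s)
--         # smallest proper period of s; it always divides n, so only divisors are tried
--         divs = []
--         d = 1
--         while d * d <= n:
--             if n % d == 0:
--                 divs.append(d)
--                 divs.append(n // d)
--             d += 1
--         divs.sort()
--         p = None
--         for q in divs:
--             if q < n and s[:q] * (n // q) == s: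
--                 p = q
--                 break
--         if p is not None:
--             res = s[:p]
--             found += 1
--     return res
-- ===== Notes on version B (the rewrite author's own statement) =====
-- stated objective: alternative
-- what changed: B precomputes the one periodic block of appended characters (the index 2k(k+1) mod len is periodic in k with period len) instead of re-evaluating index*count each step, and finds the smallest proper period by testing only the divisors of the current length (enumerated up to sqrt(n)) with a replication compare, instead of concatenating solution+solution and calling str.find each iteration; the fact that the smallest rotation offset always divides the length is proved in the Lean file.
import Mathlib
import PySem

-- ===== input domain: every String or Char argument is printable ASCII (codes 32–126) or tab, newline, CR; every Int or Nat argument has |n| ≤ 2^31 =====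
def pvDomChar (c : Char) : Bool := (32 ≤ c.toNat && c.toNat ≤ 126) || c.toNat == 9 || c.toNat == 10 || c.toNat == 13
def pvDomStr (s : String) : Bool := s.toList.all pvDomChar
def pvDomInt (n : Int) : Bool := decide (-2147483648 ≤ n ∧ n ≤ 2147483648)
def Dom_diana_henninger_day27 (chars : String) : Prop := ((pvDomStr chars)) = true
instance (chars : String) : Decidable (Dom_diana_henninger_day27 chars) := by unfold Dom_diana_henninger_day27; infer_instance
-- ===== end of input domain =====

-- B replaces A's repeated string doubling + library find by a precomputed periodic block
-- and a direct modular-rotation scan for the smallest period; objective: alternative (not faster).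

-- B replaces A's per-step string doubling + library find by a precomputed periodic block of
-- appended characters and a smallest-period search over only the divisors of the current
-- length (the smallest rotation offset divides the length); objective: alternative.

-- ===== PORT A =====
-- while found < 5: append chars[(index*count)%len], find the smallest proper period via
-- (solution+solution).find(solution, 1, -1).  fuel = 6*len bounds the loop: the appended
-- sequence is periodic with period len, so the check succeeds at least at lengths 2len..6len.
def pvLoopA (cs : List Char) : Nat → List Char → Int → Int → Nat → List Char → List Char
  | 0, _, _, _, _, res => res
  | fuel+1, solution, index, count, found, res =>
    if found < 5 then
      match PySem.List.pyGet? cs (PySem.Int.mod (index * count) (cs.length : Int)) with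
      | none => res   -- unreachable: the index is a nonnegative remainder mod len(chars) > 0
      | some c =>
        let solution := solution ++ [c]
        let temp := PySem.Chars.findFrom (solution ++ solution) solution 1 (some (-1))
        if temp ≠ -1 then
          pvLoopA cs fuel solution (index + 2) (count + 1) (found + 1)
            (PySem.List.slice solution none (some temp))
        else
          pvLoopA cs fuel solution (index + 2) (count + 1) found res
    else res

def diana_henninger_day27 (chars : String) : String :=
  let l : Int := PySem.Str.len chars
  if l == 0 then ""
  else if l == 1 then chars
  else String.ofList (pvLoopA chars.toList (6 * chars.toList.length) [] 0 1 0 [])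

-- ===== PORT B =====
-- divisors of n collected with d*d <= n (while loop, ported with fuel n ≥ number of iterations)
def pvDivLoop (n : Nat) : Nat → Nat → List Nat → List Nat
  | 0, _, acc => acc
  | fuel+1, d, acc =>
    if d * d ≤ n then
      if n % d == 0 then pvDivLoop n fuel (d + 1) (acc ++ [d, n / d])
      else pvDivLoop n fuel (d + 1) acc
    else acc

-- p = first q among the sorted divisors with q < n and s[:q] * (n//q) == s
def pvFirstDiv (s : List Char) : Option Nat :=
  (PySem.List.sorted (pvDivLoop s.length s.length 1 []) (fun x => x) false).find?
    (fun q => decide (q < s.length) &&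
      (PySem.List.pyRepeat (s.take q) ((s.length / q : Nat) : Int) == s))

def pvLoopB (block : List Char) (l : Nat) : Nat → List Char → Nat → Nat → List Char → List Char
  | 0, _, _, _, res => res
  | fuel+1, s, k, found, res =>
    if found < 5 then
      let s := s ++ [block.getD (k % l) default]
      match pvFirstDiv s with
      | some p => pvLoopB block l fuel s (k + 1) (found + 1) (s.take p)
      | none => pvLoopB block l fuel s (k + 1) found res
    else res

def diana_henninger_day27_alt (chars : String) : String :=
  let cs := chars.toList
  let l := cs.length
  if l = 0 then ""
  else if l = 1 then chars
  else
    let block := (List.range l).map (fun k => cs.getD ((2 * k * (k + 1)) % l) default)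
    String.ofList (pvLoopB block l (6 * l) [] 0 0 [])

-- ===== PRECONDITION & SPEC =====
def Spec_diana_henninger_day27 (chars : String) (out : String) : Prop := out = diana_henninger_day27_alt chars
instance (chars : String) (out : String) : Decidable (Spec_diana_henninger_day27 chars out) := by unfold Spec_diana_henninger_day27; infer_instance

-- ===== CLAIM (what is proved, stated in full; the proofs are below) =====
def Claim_equal_diana_henninger_day27 : Prop := ∀ (chars : String), Dom_diana_henninger_day27 chars → Spec_diana_henninger_day27 chars (diana_henninger_day27 chars)

-- ===== LEMMAS AND PROOFS =====

-- proof-side description of A's per-step period search (not used by either port)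
def pvRotOk (s : List Char) (p : Nat) : Bool :=
  (List.range s.length).all (fun i => s.getD i default == s.getD ((i + p) % s.length) default)

def pvFirstP (s : List Char) : Option Nat :=
  (List.range' 1 (s.length - 1)).find? (pvRotOk s)

def pvRotP (s : List Char) (p : Nat) : Prop :=
  ∀ i, i < s.length → s[i]? = s[(i + p) % s.length]?



lemma pv_rotOk_iff (s : List Char) (p : Nat) (hm : 1 ≤ s.length) :
    pvRotOk s p = true ↔ ∀ i, i < s.length → s[i]? = s[(i + p) % s.length]? := by
  unfold pvRotOk
  rw [List.all_eq_true]
  have hlt : ∀ i, (i + p) % s.length < s.length := fun i => Nat.mod_lt _ (by omega)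
  constructor
  · intro h i hi
    have := h i (by simpa using hi)
    rw [beq_iff_eq] at this
    rw [List.getD_eq_getElem _ _ hi, List.getD_eq_getElem _ _ (hlt i)] at this
    rw [List.getElem?_eq_getElem hi, List.getElem?_eq_getElem (hlt i), this]
  · intro h x hx
    simp only [List.mem_range] at hx
    have := h x hx
    rw [List.getElem?_eq_getElem hx, List.getElem?_eq_getElem (hlt x), Option.some_inj] at this
    rw [beq_iff_eq, List.getD_eq_getElem _ _ hx, List.getD_eq_getElem _ _ (hlt x)]
    exact this

lemma pv_prefix_T_iff (s : List Char) (hm : 1 ≤ s.length) (j : Nat) :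
    s <+: ((((s ++ s).take (2 * s.length - 1)).drop 1).drop j) ↔
      (j + 2 ≤ s.length ∧ pvRotOk s (j + 1) = true) := by
  set m := s.length with hmdef
  rw [List.drop_drop, List.drop_take]
  by_cases hj : j + 2 ≤ m
  · simp only [hj, true_and]
    rw [List.prefix_take_iff]
    have hlen : m ≤ 2 * m - 1 - (1 + j) := by omega
    simp only [hlen, and_true, ← hmdef]
    rw [pv_rotOk_iff s _ hm, List.prefix_iff_eq_take]
    have hkey : ∀ i, i < m →
        (List.take s.length (List.drop (1 + j) (s ++ s)))[i]? = s[(i + (j + 1)) % s.length]? := by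
      intro i hi
      rw [List.getElem?_take, if_pos (by omega), List.getElem?_drop, List.getElem?_append]
      by_cases hc : 1 + j + i < m
      · rw [if_pos (by exact hc)]
        congr 1
        rw [Nat.mod_eq_of_lt (by omega)]; omega
      · rw [if_neg (by rw [← hmdef]; omega)]
        congr 1
        rw [Nat.mod_eq_sub_mod (by omega), Nat.mod_eq_of_lt (by omega)]
        rw [← hmdef]; omega
    constructor
    · intro h i hi
      rw [← hkey i hi]
      conv_lhs => rw [h]
    · intro h
      apply List.ext_getElem?
      intro i
      by_cases hi : i < m
      · rw [hkey i hi, ← h i hi]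
      · rw [List.getElem?_eq_none (by rw [← hmdef]; omega),
            List.getElem?_eq_none (by
              simp only [List.length_take, List.length_drop, List.length_append, ← hmdef]
              omega)]
  · simp only [hj, false_and, iff_false]
    intro h
    have := h.length_le
    simp only [List.length_take, List.length_drop, List.length_append, ← hmdef] at this
    omega


lemma pv_find?_range'_none {f : Nat → Bool} {a n : Nat} :
    (List.range' a n).find? f = none ↔ ∀ q, a ≤ q → q < a + n → f q = false := by
  rw [List.find?_eq_none]
  constructor
  · intro h q hq1 hq2
    simpa using h q (by simp [List.mem_range']; exact ⟨q - a, by omega, by omega⟩)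
  · intro h x hx
    simp [List.mem_range'] at hx
    obtain ⟨i, hi, rfl⟩ := hx
    simpa using h (a + i) (by omega) (by omega)

lemma pv_find?_range'_some {f : Nat → Bool} {a n p : Nat} :
    (List.range' a n).find? f = some p ↔
      (a ≤ p ∧ p < a + n ∧ f p = true ∧ ∀ q, a ≤ q → q < p → f q = false) := by
  induction n generalizing a with
  | zero => simp [List.range']; omega
  | succ n ih =>
    rw [List.range'_succ, List.find?_cons]
    by_cases hfa : f a = true
    · rw [hfa]
      simp only [Option.some.injEq]
      constructor
      · rintro rfl; exact ⟨le_refl _, by omega, hfa, fun q h1 h2 => absurd h1 (by omega)⟩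
      · rintro ⟨h1, h2, h3, h4⟩
        by_contra hne
        have hap : a < p := lt_of_le_of_ne h1 (fun h => hne h)
        have := h4 a (le_refl _) hap
        rw [hfa] at this; exact absurd this (by simp)
    · rw [Bool.not_eq_true] at hfa
      rw [hfa]
      rw [ih]
      constructor
      · rintro ⟨h1, h2, h3, h4⟩
        exact ⟨by omega, by omega, h3, fun q hq1 hq2 => by
          rcases Nat.eq_or_lt_of_le hq1 with h | h
          · subst h; exact hfa
          · exact h4 q h hq2⟩
      · rintro ⟨h1, h2, h3, h4⟩
        have hap : a ≠ p := fun h => by subst h; rw [h3] at hfa; simp at hfa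
        exact ⟨by omega, by omega, h3, fun q hq1 hq2 => h4 q (by omega) hq2⟩

lemma pv_findFrom_reduce (s : List Char) (hm : 1 ≤ s.length) :
    PySem.Chars.findFrom (s ++ s) s 1 (some (-1)) =
      (if PySem.Chars.find (List.drop 1 (List.take (2 * s.length - 1) (s ++ s))) s = -1 then -1
       else 1 + PySem.Chars.find (List.drop 1 (List.take (2 * s.length - 1) (s ++ s))) s) := by
  have h1 : ¬ ((s.length:Int) + s.length < -1) := by omega
  have h3 : ((-1:Int) + ((s.length:Int) + s.length)).toNat = 2 * s.length - 1 := by omega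
  have h4 : ¬ ((-1:Int) + ((s.length:Int) + s.length) < 1) := by omega
  have h5 : ¬ ((-1:Int) + ((s.length:Int) + s.length) < 0) := by omega
  unfold PySem.Chars.findFrom
  simp only [List.length_append, Nat.cast_add, h1, if_false]
  norm_num [h5, h3]
  intro hcontra _
  exfalso
  have hone : 1 ≤ (s.length : Int) := by exact_mod_cast hm
  omega

lemma pv_temp_eq (s : List Char) (hm : 1 ≤ s.length) :
    PySem.Chars.findFrom (s ++ s) s 1 (some (-1)) =
      (match pvFirstP s with | none => -1 | some p => (p : Int)) := by
  rw [pv_findFrom_reduce s hm]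
  set t := List.drop 1 (List.take (2 * s.length - 1) (s ++ s)) with ht
  have hchar : ∀ j, (s <+: t.drop j) ↔ (j + 2 ≤ s.length ∧ pvRotOk s (j + 1) = true) := by
    intro j
    exact pv_prefix_T_iff s hm j
  cases hP : pvFirstP s with
  | none =>
    rw [pvFirstP, pv_find?_range'_none] at hP
    have hnf : ¬ s <:+: t := by
      intro hinf
      have hex : ∃ j, s <+: t.drop j := by
        rw [PySem.Chars.exists_prefix_drop_iff_isIn, PySem.Chars.isIn_iff_infix]
        exact hinf
      obtain ⟨j, hj⟩ := hex
      rw [hchar j] at hj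
      have := hP (j + 1) (by omega) (by omega)
      rw [hj.2] at this; simp at this
    rw [← PySem.Chars.find_eq_neg_one_iff] at hnf
    rw [hnf]
    simp
  | some p =>
    rw [pvFirstP, pv_find?_range'_some] at hP
    obtain ⟨hp1, hp2, hp3, hp4⟩ := hP
    have hpref : s <+: t.drop (p - 1) := by
      rw [hchar]
      refine ⟨by omega, ?_⟩
      have hpp : p - 1 + 1 = p := by omega
      rw [hpp]; exact hp3
    have hinf : s <:+: t := by
      rw [← PySem.Chars.isIn_iff_infix, ← PySem.Chars.exists_prefix_drop_iff_isIn]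
      exact ⟨p - 1, hpref⟩
    have hne : PySem.Chars.find t s ≠ -1 := by
      rw [PySem.Chars.find_ne_neg_one_iff]; exact hinf
    have hnonneg : 0 ≤ PySem.Chars.find t s := by
      rw [PySem.Chars.find_nonneg_iff]; exact hinf
    obtain ⟨hpf, hmin⟩ := PySem.Chars.find_spec hnonneg
    have hfr := (hchar _).mp hpf
    have hfeq : (PySem.Chars.find t s).toNat = p - 1 := by
      by_contra hneq
      rcases Nat.lt_or_ge (PySem.Chars.find t s).toNat (p - 1) with h | h
      · have := hp4 ((PySem.Chars.find t s).toNat + 1) (by omega) (by omega)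
        rw [hfr.2] at this; simp at this
      · have hlt : p - 1 < (PySem.Chars.find t s).toNat := by omega
        exact hmin (p - 1) hlt hpref
    rw [if_neg hne]
    have hred : (match (some p : Option Nat) with | none => (-1 : Int) | some p => (p : Int)) = (p : Int) := rfl
    rw [hred]
    omega

lemma pv_char_eq (cs : List Char) (l : Nat) (hl : 2 ≤ l) (hcs : cs.length = l) (k : Nat) :
    PySem.List.pyGet? cs (PySem.Int.mod ((2 * (k : Int)) * ((k : Int) + 1)) (cs.length : Int)) =
      some (((List.range l).map (fun k => cs.getD ((2 * k * (k + 1)) % l) default)).getD (k % l) default) := by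
  have hcast : (2 * (k : Int)) * ((k : Int) + 1) = ((2 * k * (k + 1) : Nat) : Int) := by
    push_cast; ring
  rw [hcast, hcs, PySem.Int.mod_natCast, PySem.List.pyGet?_natCast]
  have hl0 : 0 < l := by omega
  have hmod : (2 * k * (k + 1)) % l < l := Nat.mod_lt _ hl0
  have hkl : k % l < l := Nat.mod_lt _ hl0
  rw [List.getElem?_eq_getElem (by omega : (2 * k * (k + 1)) % l < cs.length)]
  have hgm : ((List.range l).map (fun k => cs.getD ((2 * k * (k + 1)) % l) default)).getD (k % l) default
      = cs.getD ((2 * (k % l) * ((k % l) + 1)) % l) default := by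
    rw [List.getD_eq_getElem _ _ (by simpa using hkl)]
    simp
  rw [hgm]
  have hmodeq : (2 * (k % l) * ((k % l) + 1)) % l = (2 * k * (k + 1)) % l := by
    have h : Nat.ModEq l (k % l) k := Nat.mod_modEq k l
    exact ((Nat.ModEq.refl 2).mul h).mul (h.add_right 1)
  rw [hmodeq, List.getD_eq_getElem _ _ (by omega : (2 * k * (k + 1)) % l < cs.length)]

lemma pv_rotP_add (s : List Char) (p q : Nat) (hp : pvRotP s p) (hq : pvRotP s q) :
    pvRotP s (p + q) := by
  intro i hi
  have h1 := hp i hi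
  have h2 := hq ((i + p) % s.length) (Nat.mod_lt _ (by omega))
  rw [Nat.mod_add_mod, Nat.add_assoc] at h2
  rw [h1, h2]

lemma pv_rotP_zero (s : List Char) : pvRotP s 0 := by
  intro i hi
  rw [Nat.add_zero, Nat.mod_eq_of_lt hi]

lemma pv_rotP_mul (s : List Char) (k p : Nat) (hp : pvRotP s p) : pvRotP s (k * p) := by
  induction k with
  | zero => simpa using pv_rotP_zero s
  | succ k ih =>
    have := pv_rotP_add s (k * p) p ih hp
    simpa [Nat.succ_mul] using this

lemma pv_rotP_compl (s : List Char) (p : Nat) (hp : pvRotP s p) (hpn : p < s.length) :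
    pvRotP s (s.length - p) := by
  intro i hi
  set n := s.length with hn
  have hj : (i + (n - p)) % n < n := Nat.mod_lt _ (by omega)
  have h := hp ((i + (n - p)) % n) hj
  have hmod : ((i + (n - p)) % n + p) % n = i := by
    rw [Nat.mod_add_mod]
    have : i + (n - p) + p = i + n := by omega
    rw [this, Nat.add_mod_right, Nat.mod_eq_of_lt hi]
  rw [hmod] at h
  exact h.symm

lemma pv_rotP_min_dvd (s : List Char) (d : Nat) (hd1 : 1 ≤ d)
    (hd : pvRotP s d) (hmin : ∀ q, 1 ≤ q → q < d → ¬ pvRotP s q) : d ∣ s.length := by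
  set n := s.length with hn
  by_contra hndvd
  have hr : n % d ≠ 0 := fun h => hndvd (Nat.dvd_of_mod_eq_zero h)
  have hrlt : n % d < d := Nat.mod_lt _ (by omega)
  have hm : pvRotP s ((n / d) * d) := pv_rotP_mul s (n / d) d hd
  have hcomm : (n / d) * d = d * (n / d) := Nat.mul_comm _ _
  have hdm := Nat.div_add_mod n d
  have hmlt : (n / d) * d < n := by omega
  have hcompl : pvRotP s (n - (n / d) * d) := pv_rotP_compl s _ hm hmlt
  have heq : n - (n / d) * d = n % d := by omega
  rw [heq] at hcompl
  exact hmin (n % d) (by omega) hrlt hcompl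

lemma pv_flatten_replicate_getElem? (xs : List Char) (m i : Nat)
    (hi : i < m * xs.length) :
    (List.replicate m xs).flatten[i]? = xs[i % xs.length]? := by
  induction m generalizing i with
  | zero => omega
  | succ m ih =>
    rw [List.replicate_succ, List.flatten_cons, List.getElem?_append]
    by_cases hc : i < xs.length
    · rw [if_pos hc, Nat.mod_eq_of_lt hc]
    · rw [if_neg hc]
      have h2 : i - xs.length < m * xs.length := by
        have : (m + 1) * xs.length = m * xs.length + xs.length := by ring
        omega
      rw [ih (i - xs.length) h2]
      congr 1
      conv_rhs => rw [show i = (i - xs.length) + xs.length by omega]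
      rw [Nat.add_mod_right]

lemma pv_repl_iff_rot (s : List Char) (q : Nat) (hq1 : 1 ≤ q) (hqn : q < s.length)
    (hdvd : q ∣ s.length) :
    ((PySem.List.pyRepeat (s.take q) ((s.length / q : Nat) : Int) == s) = true ↔ pvRotP s q) := by
  set n := s.length with hn
  have hq0 : 0 < q := hq1
  have htl : (s.take q).length = q := by
    rw [List.length_take]; omega
  have hmul : (n / q) * q = n := Nat.div_mul_cancel hdvd
  have hrepl : PySem.List.pyRepeat (s.take q) ((n / q : Nat) : Int) =
      (List.replicate (n / q) (s.take q)).flatten := by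
    unfold PySem.List.pyRepeat
    rw [Int.toNat_natCast]
  rw [beq_iff_eq, hrepl]
  have hget : ∀ i, i < n →
      (List.replicate (n / q) (s.take q)).flatten[i]? = s[i % q]? := by
    intro i hi
    rw [pv_flatten_replicate_getElem? (s.take q) (n / q) i (by rw [htl]; omega)]
    rw [htl]
    have hlt : i % q < q := Nat.mod_lt _ hq0
    rw [List.getElem?_take, if_pos hlt]
  constructor
  · -- replicated ⇒ rotation-invariant
    intro h i hi
    have hs : ∀ j, j < n → s[j]? = s[j % q]? := by
      intro j hj
      conv_lhs => rw [← h]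
      exact hget j hj
    have h1 := hs i hi
    have h2 := hs ((i + q) % n) (Nat.mod_lt _ (by omega))
    rw [Nat.mod_mod_of_dvd _ hdvd, Nat.add_mod_right] at h2
    rw [h1, h2]
  · -- rotation-invariant ⇒ replicated
    intro h
    have hs : ∀ j, j < n → s[j]? = s[j % q]? := by
      intro j
      induction j using Nat.strong_induction_on with
      | _ j ihj =>
        intro hj
        by_cases hc : j < q
        · rw [Nat.mod_eq_of_lt hc]
        · have hjq : j - q < n := by omega
          have hrot := h (j - q) hjq
          rw [show j - q + q = j by omega, Nat.mod_eq_of_lt hj] at hrot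
          rw [← hrot, ihj (j - q) (by omega) hjq]
          congr 1
          conv_rhs => rw [show j = (j - q) + q by omega]
          rw [Nat.add_mod_right]
    apply List.ext_getElem?
    intro i
    by_cases hi : i < n
    · rw [hget i hi, ← hs i hi]
    · rw [List.getElem?_eq_none, List.getElem?_eq_none (by omega)]
      rw [List.length_flatten]
      simp only [List.map_replicate, List.sum_replicate, smul_eq_mul]
      rw [htl]
      omega

lemma pv_divLoop_mem (n : Nat) (hn : 1 ≤ n) (x : Nat) :
    ∀ (fuel d : Nat) (acc : List Nat), 1 ≤ d → n + 1 ≤ d + fuel →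
      (x ∈ pvDivLoop n fuel d acc ↔
        x ∈ acc ∨ ∃ d', d ≤ d' ∧ d' * d' ≤ n ∧ n % d' = 0 ∧ (x = d' ∨ x = n / d')) := by
  intro fuel
  induction fuel with
  | zero =>
    intro d acc hd1 hfuel
    rw [pvDivLoop]
    constructor
    · exact Or.inl
    · rintro (h | ⟨d', hdd', hsq, _, _⟩)
      · exact h
      · exfalso
        have h1 : d' ≤ n := by nlinarith
        omega
  | succ fuel ih =>
    intro d acc hd1 hfuel
    rw [pvDivLoop]
    by_cases hsq : d * d ≤ n
    · rw [if_pos hsq]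
      by_cases hmod : n % d = 0
      · rw [if_pos (by simpa using hmod)]
        rw [ih (d + 1) _ (by omega) (by omega)]
        simp only [List.mem_append, List.mem_cons, List.not_mem_nil, or_false]
        constructor
        · rintro ((h | h) | ⟨d', h1, h2, h3, h4⟩)
          · exact Or.inl h
          · exact Or.inr ⟨d, le_refl d, hsq, hmod, h⟩
          · exact Or.inr ⟨d', by omega, h2, h3, h4⟩
        · rintro (h | ⟨d', h1, h2, h3, h4⟩)
          · exact Or.inl (Or.inl h)
          · rcases Nat.eq_or_lt_of_le h1 with rfl | hlt
            · exact Or.inl (Or.inr h4)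
            · exact Or.inr ⟨d', by omega, h2, h3, h4⟩
      · rw [if_neg (by simpa using hmod)]
        rw [ih (d + 1) _ (by omega) (by omega)]
        constructor
        · rintro (h | ⟨d', h1, h2, h3, h4⟩)
          · exact Or.inl h
          · exact Or.inr ⟨d', by omega, h2, h3, h4⟩
        · rintro (h | ⟨d', h1, h2, h3, h4⟩)
          · exact Or.inl h
          · rcases Nat.eq_or_lt_of_le h1 with rfl | hlt
            · exact absurd h3 hmod
            · exact Or.inr ⟨d', by omega, h2, h3, h4⟩
    · rw [if_neg hsq]
      constructor
      · exact Or.inl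
      · rintro (h | ⟨d', h1, h2, h3, h4⟩)
        · exact h
        · exfalso
          have : d * d ≤ d' * d' := Nat.mul_le_mul h1 h1
          omega

lemma pv_divs_mem (n : Nat) (hn : 1 ≤ n) (x : Nat) :
    x ∈ pvDivLoop n n 1 [] ↔ (1 ≤ x ∧ x ∣ n) := by
  rw [pv_divLoop_mem n hn x n 1 [] (le_refl 1) (by omega)]
  simp only [List.not_mem_nil, false_or]
  constructor
  · rintro ⟨d', h1, h2, h3, h4⟩
    have hdvd : d' ∣ n := Nat.dvd_of_mod_eq_zero h3
    rcases h4 with rfl | rfl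
    · exact ⟨h1, hdvd⟩
    · refine ⟨?_, Nat.div_dvd_of_dvd hdvd⟩
      have : d' ≤ n := by nlinarith
      exact Nat.one_le_div_iff (by omega) |>.mpr this
  · rintro ⟨hx1, hxdvd⟩
    have hxn : x ≤ n := Nat.le_of_dvd (by omega) hxdvd
    by_cases hsq : x * x ≤ n
    · exact ⟨x, hx1, hsq, Nat.mod_eq_zero_of_dvd hxdvd, Or.inl rfl⟩
    · refine ⟨n / x, ?_, ?_, ?_, Or.inr ?_⟩
      · exact Nat.one_le_div_iff (by omega) |>.mpr hxn
      · have hlt : n / x < x := (Nat.div_lt_iff_lt_mul (by omega)).mpr (by omega)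
        have h1 : n / x * x ≤ n := Nat.div_mul_le_self n x
        have h2 : n / x * (n / x) ≤ n / x * x := Nat.mul_le_mul_left _ (le_of_lt hlt)
        omega
      · exact Nat.mod_eq_zero_of_dvd (Nat.div_dvd_of_dvd hxdvd)
      · rw [Nat.div_div_self hxdvd (by omega)]

lemma pv_find?_sorted_min {L : List Nat} (hs : L.Pairwise (· ≤ ·)) {D : Nat → Bool} {x : Nat}
    (hx : x ∈ L) (hD : D x = true) (hmin : ∀ y ∈ L, D y = true → x ≤ y) :
    L.find? D = some x := by
  induction L with
  | nil => cases hx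
  | cons h t ih =>
    rw [List.find?_cons]
    by_cases hDh : D h = true
    · rw [hDh]
      simp only [Option.some.injEq]
      have h1 : x ≤ h := hmin h (List.mem_cons_self) hDh
      have h2 : h ≤ x := by
        rcases List.mem_cons.mp hx with rfl | hxt
        · exact le_refl x
        · exact (List.pairwise_cons.mp hs).1 x hxt
      omega
    · rw [Bool.not_eq_true] at hDh
      rw [hDh]
      have hxt : x ∈ t := by
        rcases List.mem_cons.mp hx with rfl | hxt
        · rw [hD] at hDh; cases hDh
        · exact hxt
      exact ih (List.pairwise_cons.mp hs).2 hxt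
        (fun y hy hDy => hmin y (List.mem_cons_of_mem _ hy) hDy)

lemma pv_first_eq (s : List Char) (hm : 1 ≤ s.length) : pvFirstP s = pvFirstDiv s := by
  unfold pvFirstP pvFirstDiv
  set L := PySem.List.sorted (pvDivLoop s.length s.length 1 []) (fun x => x) false with hL
  have hLs : L.Pairwise (· ≤ ·) := PySem.List.sorted_pairwise _ _
  have hLmem : ∀ x, x ∈ L ↔ (1 ≤ x ∧ x ∣ s.length) := by
    intro x
    rw [hL, PySem.List.mem_sorted]
    exact pv_divs_mem s.length hm x
  have hD : ∀ q, 1 ≤ q → q ∣ s.length →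
      (((decide (q < s.length) &&
        (PySem.List.pyRepeat (s.take q) ((s.length / q : Nat) : Int) == s)) = true) ↔
        (q < s.length ∧ pvRotP s q)) := by
    intro q hq1 hdvd
    simp only [Bool.and_eq_true, decide_eq_true_eq]
    constructor
    · rintro ⟨h1, h2⟩
      exact ⟨h1, (pv_repl_iff_rot s q hq1 h1 hdvd).mp h2⟩
    · rintro ⟨h1, h2⟩
      exact ⟨h1, (pv_repl_iff_rot s q hq1 h1 hdvd).mpr h2⟩
  cases hP : (List.range' 1 (s.length - 1)).find? (pvRotOk s) with
  | none =>
    rw [pv_find?_range'_none] at hP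
    symm
    rw [List.find?_eq_none]
    intro q hq hDq
    have hqm := (hLmem q).mp hq
    have hr := (hD q hqm.1 hqm.2).mp hDq
    have hok : pvRotOk s q = true := (pv_rotOk_iff s q hm).mpr hr.2
    have := hP q hqm.1 (by omega)
    rw [hok] at this
    cases this
  | some p =>
    rw [pv_find?_range'_some] at hP
    obtain ⟨hp1, hp2, hp3, hp4⟩ := hP
    have hpn : p < s.length := by omega
    have hrotp : pvRotP s p := (pv_rotOk_iff s p hm).mp hp3
    have hmin' : ∀ q, 1 ≤ q → q < p → ¬ pvRotP s q := by
      intro q h1 h2 hq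
      have := hp4 q h1 h2
      rw [(pv_rotOk_iff s q hm).mpr hq] at this
      cases this
    have hdvd : p ∣ s.length := pv_rotP_min_dvd s p hp1 hrotp hmin'
    symm
    apply pv_find?_sorted_min hLs ((hLmem p).mpr ⟨hp1, hdvd⟩) ((hD p hp1 hdvd).mpr ⟨hpn, hrotp⟩)
    intro y hy hDy
    have hym := (hLmem y).mp hy
    have hr := (hD y hym.1 hym.2).mp hDy
    by_contra hlt
    push Not at hlt
    exact hmin' y hym.1 (by omega) hr.2

lemma pv_loop_eq (cs : List Char) (l : Nat) (hl : 2 ≤ l) (hcs : cs.length = l) :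
    ∀ (fuel : Nat) (s : List Char) (k found : Nat) (res : List Char),
      pvLoopA cs fuel s (2 * (k : Int)) ((k : Int) + 1) found res =
        pvLoopB ((List.range l).map (fun k => cs.getD ((2 * k * (k + 1)) % l) default)) l fuel s k found res := by
  intro fuel
  induction fuel with
  | zero => intro s k found res; rfl
  | succ fuel ih =>
    intro s k found res
    rw [pvLoopA, pvLoopB]
    by_cases hf : found < 5
    · rw [if_pos hf, if_pos hf]
      have hget := pv_char_eq cs l hl hcs k
      set c := ((List.range l).map (fun k => cs.getD ((2 * k * (k + 1)) % l) default)).getD (k % l) default with hc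
      have hlen1 : 1 ≤ (s ++ [c]).length := by simp
      simp only [hget]
      rw [pv_temp_eq (s ++ [c]) hlen1, pv_first_eq (s ++ [c]) hlen1]
      have hidx : 2 * (k : Int) + 2 = 2 * ((k + 1 : Nat) : Int) := by push_cast; ring
      have hcnt : (k : Int) + 1 + 1 = ((k + 1 : Nat) : Int) + 1 := by push_cast; ring
      cases hP : pvFirstDiv (s ++ [c]) with
      | none =>
        have hcond : ¬ ((-1 : Int) ≠ -1) := by simp
        rw [if_neg hcond, hidx, hcnt]
        exact ih (s ++ [c]) (k + 1) found res
      | some p =>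
        have hcond : ((p : Int) ≠ -1) := by omega
        rw [if_pos hcond, PySem.List.slice_to_natCast, hidx, hcnt]
        exact ih (s ++ [c]) (k + 1) (found + 1) ((s ++ [c]).take p)
    · rw [if_neg hf, if_neg hf]

-- ===== VERDICT (by name: the statement is the Claim_ definition above) =====
theorem diana_henninger_day27_spec : Claim_equal_diana_henninger_day27 := by
  intro chars _
  unfold Spec_diana_henninger_day27 diana_henninger_day27 diana_henninger_day27_alt
  set cs := chars.toList with hcs
  rcases Nat.lt_or_ge cs.length 2 with hlen | hlen
  · interval_cases h : cs.length <;> simp [PySem.Str.len, ← hcs, h]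
  · have h0 : ¬ (cs.length = 0) := by omega
    have h1 : ¬ (cs.length = 1) := by omega
    have hA0 : ((PySem.Str.len chars == 0) = false) := by
      rw [PySem.Str.len_eq, ← hcs]
      simp only [beq_eq_false_iff_ne, ne_eq]
      omega
    have hA1 : ((PySem.Str.len chars == 1) = false) := by
      rw [PySem.Str.len_eq, ← hcs]
      simp only [beq_eq_false_iff_ne, ne_eq]
      omega
    simp only [hA0, hA1, h0, h1, if_false, Bool.false_eq_true]
    congr 1
    have := pv_loop_eq cs cs.length hlen rfl (6 * cs.length) [] 0 0 []
    norm_num at this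
    exact this
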